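-- pv_equiv track=rewrite | github.com/Ezmeyer/C10T1---Integraci-n-de-Funciones-y-Arreglos-en-Soluciones-de-Problemas-Reales | Análisis de Temperaturas Mensuales.py | meses_extremos
-- ===== SOURCE A (Python) =====
-- def meses_extremos(temps):
--     resultados = []
--
--     for ciudad in temps:
--         max_temp = max(ciudad)
--         min_temp = min(ciudad)
--
--         mes_caliente = ciudad.index(max_temp) + 1
--         mes_frio = ciudad.index(min_temp) + 1
--
--         resultados.append((mes_caliente, mes_frio))
--
--     return resultados
-- ===== SOURCE B (Python) =====
-- def _primer_argmax(ciudad):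
--     if not ciudad:
--         raise ValueError("lista vacia")
--     bv = ciudad[0]
--     bi = 0
--     for i in range(1, len(ciudad)):
--         if ciudad[i] > bv:
--             bv, bi = ciudad[i], i
--     return bi
--
--
-- def _primer_argmin(ciudad):
--     if not ciudad:
--         raise ValueError("lista vacia")
--     bv = ciudad[0]
--     bi = 0
--     for i in range(1, len(ciudad)):
--         if ciudad[i] < bv:
--             bv, bi = ciudad[i], i
--     return bi
--
--
-- def meses_extremos(temps):
--     return [(_primer_argmax(c) + 1, _primer_argmin(c) + 1) for c in temps]
-- ===== Notes on version B (the rewrite author's own statement) =====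
-- stated objective: alternative
-- what changed: Replaces the four built-in passes per city (max, min, index-of-max, index-of-min) by two explicit argmax/argmin index scans with strict updates so the first extremal index wins, matching .index.
import Mathlib
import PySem

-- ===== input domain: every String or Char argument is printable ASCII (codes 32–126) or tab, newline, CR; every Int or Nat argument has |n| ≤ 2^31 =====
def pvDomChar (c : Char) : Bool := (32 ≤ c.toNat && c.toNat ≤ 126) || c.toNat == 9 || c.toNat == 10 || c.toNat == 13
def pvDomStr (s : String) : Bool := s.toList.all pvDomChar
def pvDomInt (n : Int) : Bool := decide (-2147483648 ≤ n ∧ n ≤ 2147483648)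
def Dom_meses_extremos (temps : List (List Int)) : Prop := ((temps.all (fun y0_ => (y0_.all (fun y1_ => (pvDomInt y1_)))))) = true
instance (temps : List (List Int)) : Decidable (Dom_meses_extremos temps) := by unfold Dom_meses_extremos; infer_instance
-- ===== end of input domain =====

-- B computes each city's first argmax/argmin by explicit strict-update index scans instead of A's max/min + .index passes (alternative decomposition, same cost).

-- ===== PORT A =====
def meses_extremos (temps : List (List Int)) : List (Int × Int) :=
  temps.foldl (fun resultados ciudad =>
    match PySem.List.max? ciudad (fun x => x), PySem.List.min? ciudad (fun x => x) with
    | some mx, some mn =>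
      match PySem.List.index? ciudad mx, PySem.List.index? ciudad mn with
      | some ic, some ifr => resultados ++ [((ic : Int) + 1, (ifr : Int) + 1)]
      | _, _ => resultados            -- unreachable: max/min are members of the city
    | _, _ => resultados) []          -- none = empty city: Python raises ValueError, excluded by Pre_

-- ===== PORT B =====
def pvArgmaxAux (bv : Int) (bi i : Nat) : List Int → Nat
  | [] => bi
  | v :: rest => if v > bv then pvArgmaxAux v i (i + 1) rest else pvArgmaxAux bv bi (i + 1) rest

def pvArgminAux (bv : Int) (bi i : Nat) : List Int → Nat
  | [] => bi
  | v :: rest => if v < bv then pvArgminAux v i (i + 1) rest else pvArgminAux bv bi (i + 1) rest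

def pvPrimerArgmax : List Int → Nat
  | [] => 0          -- Python raises ValueError here; excluded by Pre_
  | h :: t => pvArgmaxAux h 0 1 t

def pvPrimerArgmin : List Int → Nat
  | [] => 0          -- Python raises ValueError here; excluded by Pre_
  | h :: t => pvArgminAux h 0 1 t

def meses_extremos_alt (temps : List (List Int)) : List (Int × Int) :=
  temps.map (fun c => ((pvPrimerArgmax c : Int) + 1, (pvPrimerArgmin c : Int) + 1))

-- ===== PRECONDITION & SPEC =====
-- Pre_ excludes inputs containing an empty city list, on which A raises ValueError (max of empty sequence).
def Pre_meses_extremos (temps : List (List Int)) : Prop := ∀ c ∈ temps, c ≠ []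
instance (temps : List (List Int)) : Decidable (Pre_meses_extremos temps) := by unfold Pre_meses_extremos; infer_instance
def pvWitness_meses_extremos : List (List Int) := [[3, 7, 7, -2], [5], [-1, -1, 0]]

def Spec_meses_extremos (temps : List (List Int)) (out : List (Int × Int)) : Prop := out = meses_extremos_alt temps
instance (temps : List (List Int)) (out : List (Int × Int)) : Decidable (Spec_meses_extremos temps out) := by unfold Spec_meses_extremos; infer_instance

-- ===== CLAIM (what is proved, stated in full; the proofs are below) =====
def Claim_equal_meses_extremos : Prop := ∀ (temps : List (List Int)), Dom_meses_extremos temps → Pre_meses_extremos temps → Spec_meses_extremos temps (meses_extremos temps)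

-- ===== LEMMAS AND PROOFS =====

theorem pv_le_foldl_max (t : List Int) (x : Int) : x ≤ t.foldl max x := by
  induction t generalizing x with
  | nil => exact le_refl x
  | cons v rest ih => exact le_trans (le_max_left x v) (ih (max x v))

theorem pv_foldl_max_mem (t : List Int) (x : Int) : t.foldl max x = x ∨ t.foldl max x ∈ t := by
  induction t generalizing x with
  | nil => exact Or.inl rfl
  | cons v rest ih =>
    rcases ih (max x v) with h | h
    · by_cases hvx : x ≤ v
      · right
        rw [max_eq_right hvx] at h
        simp [List.foldl_cons, max_eq_right hvx, h]
      · left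
        rw [max_eq_left (not_le.mp hvx).le] at h
        simp [List.foldl_cons, max_eq_left (not_le.mp hvx).le, h]
    · right
      simp only [List.foldl_cons]
      exact List.mem_cons_of_mem _ h

theorem pv_le_foldl_min (t : List Int) (x : Int) : t.foldl min x ≤ x := by
  induction t generalizing x with
  | nil => exact le_refl x
  | cons v rest ih => exact le_trans (ih (min x v)) (min_le_left x v)

theorem pv_foldl_min_mem (t : List Int) (x : Int) : t.foldl min x = x ∨ t.foldl min x ∈ t := by
  induction t generalizing x with
  | nil => exact Or.inl rfl
  | cons v rest ih =>
    rcases ih (min x v) with h | h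
    · by_cases hvx : v ≤ x
      · right
        rw [min_eq_right hvx] at h
        simp [List.foldl_cons, min_eq_right hvx, h]
      · left
        rw [min_eq_left (not_le.mp hvx).le] at h
        simp [List.foldl_cons, min_eq_left (not_le.mp hvx).le, h]
    · right
      simp only [List.foldl_cons]
      exact List.mem_cons_of_mem _ h

theorem pvArgmaxAux_eq (t : List Int) : ∀ (bv : Int) (bi i : Nat),
    pvArgmaxAux bv bi i t =
      if bv < t.foldl max bv then i + (PySem.List.index? t (t.foldl max bv)).getD 0 else bi := by
  induction t with
  | nil => intro bv bi i; simp [pvArgmaxAux]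
  | cons v rest ih =>
    intro bv bi i
    by_cases hv : v > bv
    · have hmax : max bv v = v := max_eq_right (le_of_lt hv)
      have hM : (v :: rest).foldl max bv = rest.foldl max v := by simp [List.foldl_cons, hmax]
      rw [hM]
      simp only [pvArgmaxAux, if_pos hv, ih v i (i + 1)]
      by_cases hvM : v < rest.foldl max v
      · have hmem : rest.foldl max v ∈ rest := by
          rcases pv_foldl_max_mem rest v with h | h
          · exact absurd (h ▸ hvM) (lt_irrefl _)
          · exact h
        have hne : v ≠ rest.foldl max v := ne_of_lt hvM
        rw [if_pos hvM, if_pos (lt_trans hv hvM)]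
        rw [PySem.List.index?_cons_of_ne _ hne]
        obtain ⟨k, hk⟩ := Option.isSome_iff_exists.mp ((PySem.List.index?_isSome_iff _ _).mpr hmem)
        simp only [PySem.List.index?_eq_idxOf?] at hk
        simp [hk]
        omega
      · have hle : rest.foldl max v ≤ v := not_lt.mp hvM
        have heq : rest.foldl max v = v := le_antisymm hle (pv_le_foldl_max rest v)
        rw [if_neg hvM, if_pos (by rw [heq]; exact hv), heq, PySem.List.index?_cons_self]
        simp
    · have hmax : max bv v = bv := max_eq_left (not_lt.mp hv)
      have hM : (v :: rest).foldl max bv = rest.foldl max bv := by simp [List.foldl_cons, hmax]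
      rw [hM]
      simp only [pvArgmaxAux, if_neg hv, ih bv bi (i + 1)]
      by_cases hbM : bv < rest.foldl max bv
      · have hmem : rest.foldl max bv ∈ rest := by
          rcases pv_foldl_max_mem rest bv with h | h
          · exact absurd (h ▸ hbM) (lt_irrefl _)
          · exact h
        have hne : v ≠ rest.foldl max bv := ne_of_lt (lt_of_le_of_lt (not_lt.mp hv) hbM)
        rw [if_pos hbM, if_pos hbM, PySem.List.index?_cons_of_ne _ hne]
        obtain ⟨k, hk⟩ := Option.isSome_iff_exists.mp ((PySem.List.index?_isSome_iff _ _).mpr hmem)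
        simp only [PySem.List.index?_eq_idxOf?] at hk
        simp [hk]
        omega
      · rw [if_neg hbM, if_neg hbM]

theorem pvArgminAux_eq (t : List Int) : ∀ (bv : Int) (bi i : Nat),
    pvArgminAux bv bi i t =
      if t.foldl min bv < bv then i + (PySem.List.index? t (t.foldl min bv)).getD 0 else bi := by
  induction t with
  | nil => intro bv bi i; simp [pvArgminAux]
  | cons v rest ih =>
    intro bv bi i
    by_cases hv : v < bv
    · have hmin : min bv v = v := min_eq_right (le_of_lt hv)
      have hM : (v :: rest).foldl min bv = rest.foldl min v := by simp [List.foldl_cons, hmin]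
      rw [hM]
      simp only [pvArgminAux, if_pos hv, ih v i (i + 1)]
      by_cases hvM : rest.foldl min v < v
      · have hmem : rest.foldl min v ∈ rest := by
          rcases pv_foldl_min_mem rest v with h | h
          · exact absurd (h ▸ hvM) (lt_irrefl _)
          · exact h
        have hne : v ≠ rest.foldl min v := (ne_of_lt hvM).symm
        rw [if_pos hvM, if_pos (lt_trans hvM hv)]
        rw [PySem.List.index?_cons_of_ne _ hne]
        obtain ⟨k, hk⟩ := Option.isSome_iff_exists.mp ((PySem.List.index?_isSome_iff _ _).mpr hmem)
        simp only [PySem.List.index?_eq_idxOf?] at hk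
        simp [hk]
        omega
      · have heq : rest.foldl min v = v := le_antisymm (pv_le_foldl_min rest v) (not_lt.mp hvM)
        rw [if_neg hvM, if_pos (by rw [heq]; exact hv), heq, PySem.List.index?_cons_self]
        simp
    · have hmin : min bv v = bv := min_eq_left (not_lt.mp hv)
      have hM : (v :: rest).foldl min bv = rest.foldl min bv := by simp [List.foldl_cons, hmin]
      rw [hM]
      simp only [pvArgminAux, if_neg hv, ih bv bi (i + 1)]
      by_cases hbM : rest.foldl min bv < bv
      · have hmem : rest.foldl min bv ∈ rest := by
          rcases pv_foldl_min_mem rest bv with h | h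
          · exact absurd (h ▸ hbM) (lt_irrefl _)
          · exact h
        have hne : v ≠ rest.foldl min bv := (ne_of_lt (lt_of_lt_of_le hbM (not_lt.mp hv))).symm
        rw [if_pos hbM, if_pos hbM, PySem.List.index?_cons_of_ne _ hne]
        obtain ⟨k, hk⟩ := Option.isSome_iff_exists.mp ((PySem.List.index?_isSome_iff _ _).mpr hmem)
        simp only [PySem.List.index?_eq_idxOf?] at hk
        simp [hk]
        omega
      · rw [if_neg hbM, if_neg hbM]

theorem pv_index_max (h : Int) (t : List Int) :
    PySem.List.index? (h :: t) (t.foldl max h) = some (pvPrimerArgmax (h :: t)) := by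
  simp only [pvPrimerArgmax, pvArgmaxAux_eq t h 0 1]
  by_cases hM : h < t.foldl max h
  · have hmem : t.foldl max h ∈ t := by
      rcases pv_foldl_max_mem t h with h' | h'
      · exact absurd (h' ▸ hM) (lt_irrefl _)
      · exact h'
    rw [if_pos hM, PySem.List.index?_cons_of_ne _ (ne_of_lt hM)]
    obtain ⟨k, hk⟩ := Option.isSome_iff_exists.mp ((PySem.List.index?_isSome_iff _ _).mpr hmem)
    simp only [PySem.List.index?_eq_idxOf?] at hk
    simp [hk]
    omega
  · have heq : t.foldl max h = h := le_antisymm (not_lt.mp hM) (pv_le_foldl_max t h)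
    rw [if_neg hM, heq, PySem.List.index?_cons_self]

theorem pv_index_min (h : Int) (t : List Int) :
    PySem.List.index? (h :: t) (t.foldl min h) = some (pvPrimerArgmin (h :: t)) := by
  simp only [pvPrimerArgmin, pvArgminAux_eq t h 0 1]
  by_cases hM : t.foldl min h < h
  · have hmem : t.foldl min h ∈ t := by
      rcases pv_foldl_min_mem t h with h' | h'
      · exact absurd (h' ▸ hM) (lt_irrefl _)
      · exact h'
    rw [if_pos hM, PySem.List.index?_cons_of_ne _ (ne_of_lt hM).symm]
    obtain ⟨k, hk⟩ := Option.isSome_iff_exists.mp ((PySem.List.index?_isSome_iff _ _).mpr hmem)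
    simp only [PySem.List.index?_eq_idxOf?] at hk
    simp [hk]
    omega
  · have heq : t.foldl min h = h := le_antisymm (pv_le_foldl_min t h) (not_lt.mp hM)
    rw [if_neg hM, heq, PySem.List.index?_cons_self]

theorem pv_city_step (acc : List (Int × Int)) (c : List Int) (hc : c ≠ []) :
    (match PySem.List.max? c (fun x => x), PySem.List.min? c (fun x => x) with
      | some mx, some mn =>
        match PySem.List.index? c mx, PySem.List.index? c mn with
        | some ic, some ifr => acc ++ [((ic : Int) + 1, (ifr : Int) + 1)]
        | _, _ => acc
      | _, _ => acc)
      = acc ++ [((pvPrimerArgmax c : Int) + 1, (pvPrimerArgmin c : Int) + 1)] := by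
  obtain ⟨h, t, rfl⟩ := List.exists_cons_of_ne_nil hc
  have hmax := pv_index_max h t
  have hmin := pv_index_min h t
  simp only [PySem.List.index?_eq_idxOf?] at hmax hmin
  rw [PySem.List.max?_id_cons, PySem.List.min?_id_cons]
  simp [hmax, hmin]

theorem pv_foldl_core (temps : List (List Int)) (hp : ∀ c ∈ temps, c ≠ []) :
    ∀ (acc : List (Int × Int)),
      temps.foldl (fun resultados ciudad =>
        match PySem.List.max? ciudad (fun x => x), PySem.List.min? ciudad (fun x => x) with
        | some mx, some mn =>
          match PySem.List.index? ciudad mx, PySem.List.index? ciudad mn with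
          | some ic, some ifr => resultados ++ [((ic : Int) + 1, (ifr : Int) + 1)]
          | _, _ => resultados
        | _, _ => resultados) acc
      = acc ++ meses_extremos_alt temps := by
  induction temps with
  | nil => intro acc; simp [meses_extremos_alt]
  | cons c rest ih =>
    intro acc
    have hc := hp c (List.mem_cons_self ..)
    simp only [List.foldl_cons]
    rw [pv_city_step acc c hc, ih (fun d hd => hp d (List.mem_cons_of_mem _ hd))]
    simp [meses_extremos_alt]

-- ===== VERDICT (by name: the statement is the Claim_ definition above) =====
theorem meses_extremos_spec : Claim_equal_meses_extremos := by
  intro temps _ hpre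
  unfold Spec_meses_extremos meses_extremos
  simpa using pv_foldl_core temps hpre []
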